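-- pv_equiv track=rewrite | github.com/bornpresident/Yara-Rules | LockBit3/lb3_decrypt_file.py | get_data_hash
-- ===== SOURCE A (Python) =====
-- MAX_BLOCK_SIZE = 0xFA1
--
-- DIVIDER = 0x1000F
--
-- def get_data_hash(data, rsa_n_dword0, n=0):
--     """Get data hash"""
--
--     n0 = n & 0xFFFF
--     n1 = n >> 16
--
--     size = len(data)
--
--     pos = 0
--
--     while (size != 0):
--
--         block_size = min(size, MAX_BLOCK_SIZE)
--
--         for i in range(block_size):
--             n0 += data[pos + i]
--             n1 += n0
--
--         n0 %= DIVIDER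
--         n1 %= DIVIDER
--
--         pos += block_size
--         size -= block_size
--
--     return ((n0 + (n1 << 16)) & 0xFFFFFFFF) ^ rsa_n_dword0
-- ===== SOURCE B (Python) =====
-- DIVIDER = 0x1000F
--
-- def get_data_hash(data, rsa_n_dword0, n=0):
--     """Get data hash (closed form: one pass of sums instead of blockwise loop)"""
--     m = len(data)
--     n0 = (n & 0xFFFF) + sum(data)
--     n1 = (n >> 16) + m * (n & 0xFFFF) + sum((m - i) * b for i, b in enumerate(data))
--     if m != 0:
--         n0 %= DIVIDER
--         n1 %= DIVIDER
--     return ((n0 + (n1 << 16)) & 0xFFFFFFFF) ^ rsa_n_dword0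
-- ===== Notes on version B (the rewrite author's own statement) =====
-- stated objective: simpler
-- what changed: Replaces the blockwise while-loop with per-block modular reduction by a closed form: one pass computing sum(data) and the weighted sum sum((m-i)*b), reduced mod 0x1000F once at the end (skipped when data is empty, matching A's empty path).
import Mathlib
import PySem

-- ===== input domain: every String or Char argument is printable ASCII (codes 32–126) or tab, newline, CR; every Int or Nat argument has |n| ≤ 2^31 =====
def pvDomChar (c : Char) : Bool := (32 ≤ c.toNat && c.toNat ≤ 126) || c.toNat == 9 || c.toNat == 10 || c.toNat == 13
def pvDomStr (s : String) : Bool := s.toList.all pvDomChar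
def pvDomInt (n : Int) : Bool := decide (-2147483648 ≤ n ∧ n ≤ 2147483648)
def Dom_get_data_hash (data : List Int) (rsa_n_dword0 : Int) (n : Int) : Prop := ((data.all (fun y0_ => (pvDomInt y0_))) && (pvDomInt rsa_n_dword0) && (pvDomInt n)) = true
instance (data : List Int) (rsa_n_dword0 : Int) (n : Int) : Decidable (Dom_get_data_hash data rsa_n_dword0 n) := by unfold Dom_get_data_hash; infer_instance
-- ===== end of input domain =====

-- B replaces A's blockwise while-loop (mod at every block boundary) by a closed form:
-- one pass of sums reduced mod 0x1000F once at the end (skipped when data is empty); objective: simpler.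


-- ===== PORT A =====
-- inner 'for i in range(block_size)' loop; data[pos+i] is always in range here, so getD is exact
def lb3InnerA (data : List Int) (pos : Nat) (bs : Nat) (st : Int × Int) : Int × Int :=
  (List.range bs).foldl (fun st i =>
    let n0 := st.1 + data.getD (pos + i) 0
    (n0, st.2 + n0)) st

-- the 'while size != 0' loop; 0xFA1 = 4001, DIVIDER = 0x1000F = 65551
def lb3LoopA (data : List Int) (n0 n1 : Int) (pos size : Nat) : Int × Int :=
  if _h : size = 0 then (n0, n1)
  else
    let bs := min size 4001
    let st := lb3InnerA data pos bs (n0, n1)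
    lb3LoopA data (PySem.Int.mod st.1 65551) (PySem.Int.mod st.2 65551) (pos + bs) (size - bs)
termination_by size
decreasing_by omega

def get_data_hash (data : List Int) (rsa_n_dword0 : Int) (n : Int) : Int :=
  let st := lb3LoopA data (PySem.Int.band n 65535) (n >>> 16) 0 data.length
  PySem.Int.bxor (PySem.Int.band (st.1 + (st.2 <<< 16)) 4294967295) rsa_n_dword0

-- ===== PORT B =====
def get_data_hash_alt (data : List Int) (rsa_n_dword0 : Int) (n : Int) : Int :=
  let m := data.length
  let n0 := PySem.Int.band n 65535 + data.sum
  let n1 := (n >>> 16) + (m : Int) * PySem.Int.band n 65535 +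
    ((PySem.List.enumerate data 0).map (fun p => ((m : Int) - p.1) * p.2)).sum
  let n0' := if m ≠ 0 then PySem.Int.mod n0 65551 else n0
  let n1' := if m ≠ 0 then PySem.Int.mod n1 65551 else n1
  PySem.Int.bxor (PySem.Int.band (n0' + (n1' <<< 16)) 4294967295) rsa_n_dword0

-- ===== PRECONDITION & SPEC =====
def Spec_get_data_hash (data : List Int) (rsa_n_dword0 : Int) (n : Int) (out : Int) : Prop := out = get_data_hash_alt data rsa_n_dword0 n
instance (data : List Int) (rsa_n_dword0 : Int) (n : Int) (out : Int) : Decidable (Spec_get_data_hash data rsa_n_dword0 n out) := by unfold Spec_get_data_hash; infer_instance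

-- ===== CLAIM (what is proved, stated in full; the proofs are below) =====
def Claim_equal_get_data_hash : Prop := ∀ (data : List Int) (rsa_n_dword0 : Int) (n : Int), Dom_get_data_hash data rsa_n_dword0 n → Spec_get_data_hash data rsa_n_dword0 n (get_data_hash data rsa_n_dword0 n)

-- ===== LEMMAS AND PROOFS =====

-- plain-sum and weighted-sum of data[pos:pos+k]
def lb3S (data : List Int) (pos k : Nat) : Int :=
  ∑ i ∈ Finset.range k, data.getD (pos + i) 0

def lb3W (data : List Int) (pos k : Nat) : Int :=
  ∑ i ∈ Finset.range k, ((k : Int) - i) * data.getD (pos + i) 0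

theorem lb3S_succ (data : List Int) (pos k : Nat) :
    lb3S data pos (k + 1) = lb3S data pos k + data.getD (pos + k) 0 := by
  simp [lb3S, Finset.sum_range_succ]

theorem lb3W_succ (data : List Int) (pos k : Nat) :
    lb3W data pos (k + 1) = lb3W data pos k + lb3S data pos (k + 1) := by
  unfold lb3W lb3S
  rw [Finset.sum_range_succ, Finset.sum_range_succ]
  rw [Finset.sum_congr rfl (fun i _ => show (((k + 1 : Nat) : Int) - i) * data.getD (pos + i) 0
        = ((k : Int) - i) * data.getD (pos + i) 0 + data.getD (pos + i) 0 from by push_cast; ring)]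
  rw [Finset.sum_add_distrib]
  push_cast; ring

theorem lb3InnerA_eq (data : List Int) (pos k : Nat) (n0 n1 : Int) :
    lb3InnerA data pos k (n0, n1) =
      (n0 + lb3S data pos k, n1 + (k : Int) * n0 + lb3W data pos k) := by
  induction k with
  | zero => simp [lb3InnerA, lb3S, lb3W]
  | succ k ih =>
      unfold lb3InnerA at ih ⊢
      rw [List.range_succ, List.foldl_append, ih]
      simp only [List.foldl_cons, List.foldl_nil]
      rw [lb3S_succ, lb3W_succ, lb3S_succ]
      simp only [Prod.mk.injEq]
      refine ⟨by ring, by push_cast; ring⟩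

theorem lb3S_add (data : List Int) (pos a b : Nat) :
    lb3S data pos (a + b) = lb3S data pos a + lb3S data (pos + a) b := by
  unfold lb3S
  rw [Finset.sum_range_add]
  congr 1
  exact Finset.sum_congr rfl (fun i _ => by rw [add_assoc])

theorem lb3W_add (data : List Int) (pos a b : Nat) :
    lb3W data pos (a + b) =
      lb3W data pos a + (b : Int) * lb3S data pos a + lb3W data (pos + a) b := by
  unfold lb3W lb3S
  rw [Finset.sum_range_add, Finset.mul_sum, ← Finset.sum_add_distrib]
  congr 1
  · exact Finset.sum_congr rfl (fun i _ => by push_cast; ring)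
  · exact Finset.sum_congr rfl (fun i _ => by rw [add_assoc]; push_cast; ring)

theorem lb3mod_eq (a : Int) : PySem.Int.mod a 65551 = a % 65551 :=
  PySem.Int.mod_eq_emod_of_pos (by norm_num)

theorem lb3emod_add_left (x y : Int) : (x % 65551 + y) % 65551 = (x + y) % 65551 := by
  rw [Int.add_emod, Int.emod_emod_of_dvd _ dvd_rfl, ← Int.add_emod]

theorem lb3emod_mul_right (c x : Int) : c * (x % 65551) % 65551 = c * x % 65551 := by
  rw [Int.mul_emod, Int.emod_emod_of_dvd _ dvd_rfl, ← Int.mul_emod]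

theorem lb3emod_mul_add (c x y : Int) :
    (c * (x % 65551) + y) % 65551 = (c * x + y) % 65551 := by
  rw [Int.add_emod, lb3emod_mul_right, ← Int.add_emod]

theorem lb3emod_combo (a c x z : Int) :
    (a % 65551 + c * (x % 65551) + z) % 65551 = (a + c * x + z) % 65551 := by
  rw [add_assoc, lb3emod_add_left,
    show a + (c * (x % 65551) + z) = c * (x % 65551) + (a + z) from by ring,
    lb3emod_mul_add]
  congr 1; ring

theorem lb3LoopA_closed (data : List Int) (size : Nat) (n0 n1 : Int) (pos : Nat)
    (hs : size ≠ 0) :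
    lb3LoopA data n0 n1 pos size =
      ((n0 + lb3S data pos size) % 65551,
       (n1 + (size : Int) * n0 + lb3W data pos size) % 65551) := by
  induction size using Nat.strong_induction_on generalizing n0 n1 pos with
  | _ size ih =>
    rw [lb3LoopA]
    simp only [hs, dite_false]
    rw [lb3InnerA_eq]
    by_cases hle : size ≤ 4001
    · have hbs : min size 4001 = size := by omega
      rw [hbs]
      have h0 : size - size = 0 := by omega
      rw [h0, lb3LoopA]
      simp
    · obtain ⟨b, rfl⟩ : ∃ b, size = 4001 + b := ⟨size - 4001, by omega⟩
      have hbs : min (4001 + b) 4001 = 4001 := by omega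
      rw [hbs]
      have h0 : 4001 + b - 4001 = b := by omega
      rw [h0, ih b (by omega) _ _ _ (by omega)]
      dsimp only
      simp only [lb3mod_eq, Prod.mk.injEq]
      constructor
      · rw [lb3emod_add_left, lb3S_add]
        refine congrArg (· % 65551) ?_
        ring
      · rw [lb3emod_combo, lb3W_add]
        refine congrArg (· % 65551) ?_
        push_cast
        ring

theorem lb3S_full (data : List Int) : lb3S data 0 data.length = data.sum := by
  induction data with
  | nil => simp [lb3S]
  | cons x xs ih =>
      unfold lb3S at ih ⊢
      simp only [List.length_cons, List.sum_cons]
      rw [Finset.sum_range_succ']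
      have h : ∀ i ∈ Finset.range xs.length,
          (x :: xs).getD (0 + (i + 1)) 0 = xs.getD (0 + i) 0 := by
        intro i _; simp
      rw [Finset.sum_congr rfl h, ih]
      simp [add_comm]

theorem lb3enum_sum (data : List Int) (M : Int) : ∀ s : Int,
    ((PySem.List.enumerate data s).map (fun p => (M - p.1) * p.2)).sum =
      ∑ i ∈ Finset.range data.length, (M - s - i) * data.getD i 0 := by
  induction data with
  | nil => intro s; simp [PySem.List.enumerate_nil]
  | cons x xs ih =>
      intro s
      rw [PySem.List.enumerate_cons]
      simp only [List.map_cons, List.sum_cons, List.length_cons]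
      rw [ih (s + 1), Finset.sum_range_succ']
      have h : ∀ i ∈ Finset.range xs.length,
          (M - s - ((i + 1 : Nat) : Int)) * (x :: xs).getD (i + 1) 0 =
            (M - (s + 1) - (i : Int)) * xs.getD i 0 := by
        intro i _
        simp only [List.getD_cons_succ]
        push_cast; ring
      rw [Finset.sum_congr rfl h]
      simp only [List.getD_cons_zero, Nat.cast_zero]
      ring

theorem lb3W_full (data : List Int) :
    lb3W data 0 data.length =
      ((PySem.List.enumerate data 0).map
        (fun p => ((data.length : Int) - p.1) * p.2)).sum := by
  rw [lb3enum_sum data _ 0]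
  unfold lb3W
  apply Finset.sum_congr rfl
  intro i _
  simp

-- ===== VERDICT (by name: the statement is the Claim_ definition above) =====
theorem get_data_hash_spec : Claim_equal_get_data_hash := by
  intro data rsa_n_dword0 n _
  unfold Spec_get_data_hash get_data_hash get_data_hash_alt
  by_cases hm : data.length = 0
  · rw [List.length_eq_zero_iff] at hm
    subst hm
    rw [lb3LoopA]
    simp [PySem.List.enumerate_nil]
  · simp only [hm, ne_eq, not_false_iff, if_pos]
    rw [lb3LoopA_closed data data.length _ _ 0 hm]
    simp only [lb3mod_eq, lb3S_full, lb3W_full]
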